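-- pv_equiv track=rewrite | github.com/AndreeWanya/graduate-programming-school | 8_tasks_++/5_Cyberpunk_203x_1992.py | massdriver
-- ===== SOURCE A (Python) =====
-- def massdriver(activate: list) -> int:
--     my_dict = {}
--     result = -1
--     for i in range(len(activate)):
--         if activate[i] not in my_dict:
--             my_dict[activate[i]] = i
--         elif my_dict[activate[i]] < result or result == -1:
--             result = my_dict[activate[i]]
--     return result
-- ===== SOURCE B (Python) =====
-- def massdriver(activate: list) -> int:
--     counts = {}
--     for v in activate:
--         counts[v] = counts.get(v, 0) + 1
--     for i, v in enumerate(activate):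
--         if counts[v] > 1:
--             return i
--     return -1
-- ===== Notes on version B (the rewrite author's own statement) =====
-- stated objective: simpler
-- what changed: Replaces the single-pass first-index dict with running-minimum updates by a two-pass scheme: build a frequency table, then early-return the first index whose value is duplicated (that position equals the minimum first-index among duplicated values).
import Mathlib
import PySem

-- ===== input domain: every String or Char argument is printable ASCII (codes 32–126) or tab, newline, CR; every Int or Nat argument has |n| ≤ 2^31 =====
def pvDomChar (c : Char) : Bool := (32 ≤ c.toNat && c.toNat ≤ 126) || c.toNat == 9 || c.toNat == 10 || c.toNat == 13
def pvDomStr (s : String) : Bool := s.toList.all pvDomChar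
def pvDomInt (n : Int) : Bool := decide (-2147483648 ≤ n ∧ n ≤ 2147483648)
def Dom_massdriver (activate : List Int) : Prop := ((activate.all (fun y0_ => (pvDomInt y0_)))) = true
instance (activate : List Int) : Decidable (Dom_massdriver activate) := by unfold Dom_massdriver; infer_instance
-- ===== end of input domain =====

-- B replaces A's single-pass first-index dict with running-minimum updates by a frequency table
-- followed by an early-returning scan for the first position holding a duplicated value (same O(n)).

-- ===== PORT A =====
def massdriver (activate : List Int) : Int :=
  (((PySem.List.pyRange 0 (activate.length : Int) 1).foldl
      (fun (st : PySem.Dict Int Int × Int) i =>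
        let x := PySem.List.pyGetD activate i 0
        match st.1.get? x with
        | none => (st.1.insert x i, st.2)
        | some j => if j < st.2 || st.2 == -1 then (st.1, j) else st)
      (PySem.Dict.empty, -1))).2

-- ===== PORT B =====
-- the early-returning 'for i, v in enumerate(activate): if counts[v] > 1: return i'
def massdriverScan (counts : PySem.Dict Int Int) : List (Int × Int) → Int
  | [] => -1
  | (i, v) :: rest => if 1 < counts.getD v 0 then i else massdriverScan counts rest

def massdriver_alt (activate : List Int) : Int :=
  let counts := activate.foldl (fun d v => d.insert v (d.getD v 0 + 1)) PySem.Dict.empty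
  massdriverScan counts (PySem.List.enumerate activate 0)

-- ===== PRECONDITION & SPEC =====
def Spec_massdriver (activate : List Int) (out : Int) : Prop := out = massdriver_alt activate
instance (activate : List Int) (out : Int) : Decidable (Spec_massdriver activate out) := by unfold Spec_massdriver; infer_instance

-- ===== CLAIM (what is proved, stated in full; the proofs are below) =====
def Claim_equal_massdriver : Prop := ∀ (activate : List Int), Dom_massdriver activate → Spec_massdriver activate (massdriver activate)

-- ===== LEMMAS AND PROOFS =====

-- Both programs return the first index whose value occurs more than once in the list, or -1.
def Char_md (l : List Int) (r : Int) : Prop :=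
  (r = -1 ∧ ∀ j < l.length, l.count (l.getD j 0) ≤ 1) ∨
  (∃ i : Nat, r = (i : Int) ∧ i < l.length ∧ 1 < l.count (l.getD i 0) ∧
      ∀ j < i, l.count (l.getD j 0) ≤ 1)

theorem Char_md_unique (l : List Int) (r r' : Int)
    (h : Char_md l r) (h' : Char_md l r') : r = r' := by
  rcases h with ⟨rfl, hall⟩ | ⟨i, rfl, hi, hc, hmin⟩ <;>
    rcases h' with ⟨rfl, hall'⟩ | ⟨i', rfl, hi', hc', hmin'⟩
  · rfl
  · exact absurd hc' (by simpa using hall i' hi')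
  · exact absurd hc (by simpa using hall' i hi)
  · rcases lt_trichotomy i i' with hlt | rfl | hgt
    · exact absurd hc (by simpa using hmin' i hlt)
    · rfl
    · exact absurd hc' (by simpa using hmin i' hgt)

theorem count_app (p : List Int) (x v : Int) :
    (p ++ [x]).count v = p.count v + (if v = x then 1 else 0) := by
  by_cases h : v = x <;> simp [List.count_append, h, List.count_eq_zero]

theorem getD_app (p : List Int) (x : Int) {j : Nat} (h : j < p.length) :
    (p ++ [x]).getD j 0 = p.getD j 0 := List.getD_append p [x] 0 j h

theorem getD_app_len (p : List Int) (x : Int) : (p ++ [x]).getD p.length 0 = x := by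
  simp [List.getD]

theorem getD_mem (p : List Int) {j : Nat} (h : j < p.length) : p.getD j 0 ∈ p := by
  rw [List.getD_eq_getElem p 0 h]; exact List.getElem_mem h

-- Char_md survives appending a value whose first index is j0 and whose count becomes > 1,
-- provided no index below j0 already held a duplicated value.
theorem char_app_first (p : List Int) (x : Int) (j0 : Nat) (hj : j0 < p.length)
    (hval : p.getD j0 0 = x) (hx : x ∈ p)
    (hfst : ∀ i < j0, p.getD i 0 ≠ x)
    (hmin : ∀ j < j0, p.count (p.getD j 0) ≤ 1) :
    Char_md (p ++ [x]) (j0 : Int) := by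
  right
  refine ⟨j0, rfl, by simp; omega, ?_, ?_⟩
  · rw [getD_app p x hj, hval, count_app]
    have := List.one_le_count_iff.mpr hx
    simp; omega
  · intro j hjj
    rw [getD_app p x (lt_trans hjj hj), count_app, if_neg (hfst j hjj)]
    have := hmin j hjj
    omega

-- Char_md's positive clause survives appending x when no index below i held x.
theorem char_app_keep (p : List Int) (x : Int) (i : Nat) (hi : i < p.length)
    (hc : 1 < p.count (p.getD i 0)) (hmin : ∀ j < i, p.count (p.getD j 0) ≤ 1)
    (hxi : ∀ j < i, p.getD j 0 ≠ x) :
    Char_md (p ++ [x]) (i : Int) := by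
  right
  refine ⟨i, rfl, by simp; omega, ?_, ?_⟩
  · rw [getD_app p x hi, count_app]
    split_ifs <;> omega
  · intro j hj
    rw [getD_app p x (lt_trans hj hi), count_app, if_neg (hxi j hj)]
    have := hmin j hj
    omega

-- Char_md survives appending a fresh value.
theorem char_app_fresh (p : List Int) (x : Int) (hx : x ∉ p) (r : Int)
    (h : Char_md p r) : Char_md (p ++ [x]) r := by
  rcases h with ⟨rfl, hall⟩ | ⟨i, rfl, hi, hc, hmin⟩
  · left
    refine ⟨rfl, ?_⟩
    intro j hj
    simp only [List.length_append, List.length_cons, List.length_nil] at hj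
    rcases Nat.lt_or_ge j p.length with h | h
    · rw [getD_app p x h, count_app]
      have hne : p.getD j 0 ≠ x := fun he => hx (he ▸ getD_mem p h)
      rw [if_neg hne]
      have := hall j h
      omega
    · have hje : j = p.length := by omega
      subst hje
      rw [getD_app_len, count_app]
      simp [List.count_eq_zero.mpr hx]
  · exact char_app_keep p x i hi hc hmin
      (fun j hj he => hx (he ▸ getD_mem p (lt_trans hj hi)))

-- dict invariant survives a fresh insert
theorem invD_app_fresh (p : List Int) (x : Int) (hx : x ∉ p) (d : PySem.Dict Int Int)
    (hd : ∀ v, d.get? v = (PySem.List.index? p v).map (fun n => (n : Int))) (v : Int) :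
    (d.insert x (p.length : Int)).get? v
      = (PySem.List.index? (p ++ [x]) v).map (fun n => (n : Int)) := by
  by_cases hv : v = x
  · subst hv
    rw [PySem.Dict.get?_insert_self, PySem.List.index?_append_singleton_self p v hx]
    rfl
  · rw [PySem.Dict.get?_insert_of_ne d _ hv, hd v]
    by_cases hvp : v ∈ p
    · rw [PySem.List.index?_append_of_mem [x] hvp]
    · rw [(PySem.List.index?_eq_none_iff p v).mpr hvp,
        (PySem.List.index?_eq_none_iff (p ++ [x]) v).mpr (by simp [hvp, hv])]

-- dict invariant survives appending a value already present (dict unchanged)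
theorem invD_app_mem (p : List Int) (x : Int) (hx : x ∈ p) (d : PySem.Dict Int Int)
    (hd : ∀ v, d.get? v = (PySem.List.index? p v).map (fun n => (n : Int))) (v : Int) :
    d.get? v = (PySem.List.index? (p ++ [x]) v).map (fun n => (n : Int)) := by
  by_cases hvp : v ∈ p
  · rw [hd v, PySem.List.index?_append_of_mem [x] hvp]
  · have hvx : v ≠ x := fun h => hvp (h ▸ hx)
    rw [hd v, (PySem.List.index?_eq_none_iff p v).mpr hvp,
      (PySem.List.index?_eq_none_iff (p ++ [x]) v).mpr (by simp [hvp, hvx])]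

-- A-side: the loop invariant.  After processing prefix p, the dict maps each value of p to its
-- first index in p, and the running result satisfies Char_md for the prefix.
theorem massdriver_fold_inv (rest : List Int) :
    ∀ (p : List Int) (d : PySem.Dict Int Int) (r : Int),
    (∀ v, d.get? v = (PySem.List.index? p v).map (fun n => (n : Int))) →
    Char_md p r →
    Char_md (p ++ rest)
      (((PySem.List.enumerate rest (p.length : Int)).foldl
        (fun (st : PySem.Dict Int Int × Int) q =>
          match st.1.get? q.2 with
          | none => (st.1.insert q.2 q.1, st.2)
          | some j => if j < st.2 || st.2 == -1 then (st.1, j) else st)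
        (d, r))).2 := by
  induction rest with
  | nil => intro p d r _ hr; simpa using hr
  | cons x t ih =>
    intro p d r hd hr
    rw [PySem.List.enumerate_cons]
    simp only [List.foldl_cons]
    have hlen : ((p ++ [x]).length : Int) = (p.length : Int) + 1 := by simp
    cases hx : d.get? x with
    | none =>
      have hxp : x ∉ p := by
        have := hd x
        rw [hx] at this
        rcases h' : PySem.List.index? p x with _ | k
        · exact (PySem.List.index?_eq_none_iff p x).mp h'
        · rw [h'] at this; simp at this
      have := ih (p ++ [x]) (d.insert x (p.length : Int)) r
        (invD_app_fresh p x hxp d hd) (char_app_fresh p x hxp r hr)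
      rw [hlen] at this
      simpa [List.append_assoc] using this
    | some j =>
      have hdx := hd x
      rw [hx] at hdx
      rcases h' : PySem.List.index? p x with _ | j0
      · rw [h'] at hdx; simp at hdx
      rw [h'] at hdx
      have hj : j = (j0 : Int) := by simpa using hdx
      subst hj
      obtain ⟨hj0, hval, hfst⟩ := PySem.List.getElem_of_index?_eq_some h'
      have hxmem : x ∈ p := by rw [← hval]; exact List.getElem_mem hj0
      have hvalD : p.getD j0 0 = x := by rw [List.getD_eq_getElem p 0 hj0, hval]
      have hfstD : ∀ i < j0, p.getD i 0 ≠ x := fun i hi => by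
        rw [List.getD_eq_getElem p 0 (lt_trans hi hj0)]; exact hfst i hi
      rcases hr with ⟨rfl, hall⟩ | ⟨i, rfl, hi, hc, hmin⟩
      · -- result was -1: it becomes j0
        have hcond : ((decide ((j0 : Int) < (-1 : Int))) || (((-1 : Int)) == (-1 : Int))) = true := by
          simp
        simp only [hcond, if_true]
        have := ih (p ++ [x]) d ((j0 : Int)) (invD_app_mem p x hxmem d hd)
          (char_app_first p x j0 hj0 hvalD hxmem hfstD
            (fun jj hjj => hall jj (lt_trans hjj hj0)))
        rw [hlen] at this
        simpa [List.append_assoc] using this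
      · -- result was i ≥ 0: it becomes min i j0
        have hne : ((((i : Int))) == (-1 : Int)) = false := by
          simp only [beq_eq_false_iff_ne]; omega
        by_cases hji : j0 < i
        · have hcond : ((decide ((j0 : Int) < ((i : Nat) : Int))) || ((((i : Nat) : Int)) == -1)) = true := by
            simp only [hne, Bool.or_false, decide_eq_true_eq]
            exact_mod_cast hji
          simp only [hcond, if_true]
          have := ih (p ++ [x]) d ((j0 : Int)) (invD_app_mem p x hxmem d hd)
            (char_app_first p x j0 hj0 hvalD hxmem hfstD
              (fun jj hjj => hmin jj (lt_trans hjj hji)))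
          rw [hlen] at this
          simpa [List.append_assoc] using this
        · have hcond : ((decide ((j0 : Int) < ((i : Nat) : Int))) || ((((i : Nat) : Int)) == -1)) = false := by
            simp only [hne, Bool.or_false, decide_eq_false_iff_not]
            exact_mod_cast hji
          simp only [hcond]
          have hxi : ∀ jj < i, p.getD jj 0 ≠ x := fun jj hjj he => by
            have : ¬ jj < j0 := fun hlt => hfstD jj hlt he
            omega
          have := ih (p ++ [x]) d (((i : Nat) : Int)) (invD_app_mem p x hxmem d hd)
            (char_app_keep p x i hi hc hmin hxi)
          rw [hlen] at this
          simpa [List.append_assoc] using this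

theorem massdriver_char (l : List Int) : Char_md l (massdriver l) := by
  have h := massdriver_fold_inv l [] PySem.Dict.empty (-1)
    (fun v => by
      rw [PySem.Dict.get?_empty, (PySem.List.index?_eq_none_iff [] v).mpr (List.not_mem_nil)]
      rfl)
    (Or.inl ⟨rfl, by simp⟩)
  simp only [List.length_nil, Nat.cast_zero, List.nil_append] at h
  rw [PySem.List.enumerate_eq_map_pyRange l 0, List.foldl_map] at h
  simpa [massdriver] using h

-- B-side: the scan over a suffix starting at position s
theorem massdriverScan_suffix (l : List Int) (cnt : PySem.Dict Int Int)
    (hc : ∀ v, cnt.getD v 0 = (l.count v : Int)) :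
    ∀ (t : List Int) (s : Nat), s ≤ l.length → l.drop s = t →
    (∀ j < s, l.count (l.getD j 0) ≤ 1) →
    Char_md l (massdriverScan cnt (PySem.List.enumerate t (s : Int))) := by
  intro t
  induction t with
  | nil =>
    intro s hs hd hprev
    have hsl : s = l.length := by
      have := List.drop_eq_nil_iff.mp hd
      omega
    simp only [PySem.List.enumerate_nil, massdriverScan]
    exact Or.inl ⟨rfl, fun j hj => hprev j (hsl ▸ hj)⟩
  | cons x t ih =>
    intro s hs hd hprev
    have hsl : s < l.length := by
      by_contra hcon
      have hnil : l.drop s = [] := List.drop_eq_nil_iff.mpr (by omega)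
      rw [hd] at hnil
      simp at hnil
    have hgd : l.getD s 0 = x := by
      have h0 : l[s]? = some x := by
        have h1 : (l.drop s)[0]? = l[s+0]? := List.getElem?_drop
        rw [hd] at h1
        simpa using h1.symm
      simp [List.getD, h0]
    rw [PySem.List.enumerate_cons]
    simp only [massdriverScan, hc x]
    by_cases hx : 1 < l.count x
    · rw [if_pos (by exact_mod_cast hx)]
      exact Or.inr ⟨s, rfl, hsl, hgd ▸ hx, hprev⟩
    · rw [if_neg (by exact_mod_cast hx)]
      have hdt : l.drop (s + 1) = t := by
        rw [← List.drop_drop, hd]; rfl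
      have := ih (s + 1) (by omega) hdt
        (fun j hj => by
          rcases Nat.lt_or_ge j s with h | h
          · exact hprev j h
          · have : j = s := by omega
            subst this
            rw [hgd]; omega)
      simpa [Nat.cast_add] using this

theorem massdriver_alt_char (l : List Int) : Char_md l (massdriver_alt l) := by
  unfold massdriver_alt
  have hc : ∀ v, (l.foldl (fun d v => d.insert v (d.getD v 0 + 1)) PySem.Dict.empty).getD v 0
      = (l.count v : Int) := by
    intro v
    rw [PySem.Dict.getD_foldl_insert_add_one l PySem.Dict.empty v, PySem.Dict.getD_empty]
    simp [List.count]
  have := massdriverScan_suffix l _ hc l 0 (by omega) (by simp) (by omega)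
  simpa using this

-- ===== VERDICT (by name: the statement is the Claim_ definition above) =====
theorem massdriver_spec : Claim_equal_massdriver := by
  intro l _
  unfold Spec_massdriver
  exact Char_md_unique l _ _ (massdriver_char l) (massdriver_alt_char l)
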